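-- pv_equiv track=rewrite | github.com/rrajpuro/quicklyv2 | northboundVerifier.py | checkContainerNames
-- ===== SOURCE A (Python) =====
-- def checkContainerNames(data):
--     flag = False
--     names = []
--     for vpc in data["vpcs"]:
--         if "containers" in vpc.keys():
--             for vms in vpc["containers"]:
--                 names.append(vms["name"])
--             if len(names) != len(set(names)):
--                 flag = True
--                 break
--             else:
--                 names = []
--     if flag:
--         return "\t[E] Conflicting Container Names (0x1e)"
--     else:
--         return "[OK] Container Names valid (0x00)"
-- ===== SOURCE B (Python) =====
-- def checkContainerNames(data):
--     for vpc in data["vpcs"]: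
--         if "containers" in vpc:
--             seen = set()
--             for vms in vpc["containers"]:
--                 name = vms["name"]
--                 if name in seen:
--                     return "\t[E] Conflicting Container Names (0x1e)"
--                 seen.add(name)
--     return "[OK] Container Names valid (0x00)"
-- ===== Notes on version B (the rewrite author's own statement) =====
-- stated objective: idiomatic
-- what changed: Replaces the flag + per-VPC list build + len(set()) size comparison with an early-return scan that maintains an incremental per-VPC 'seen' set and stops at the first repeated name.
import Mathlib
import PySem

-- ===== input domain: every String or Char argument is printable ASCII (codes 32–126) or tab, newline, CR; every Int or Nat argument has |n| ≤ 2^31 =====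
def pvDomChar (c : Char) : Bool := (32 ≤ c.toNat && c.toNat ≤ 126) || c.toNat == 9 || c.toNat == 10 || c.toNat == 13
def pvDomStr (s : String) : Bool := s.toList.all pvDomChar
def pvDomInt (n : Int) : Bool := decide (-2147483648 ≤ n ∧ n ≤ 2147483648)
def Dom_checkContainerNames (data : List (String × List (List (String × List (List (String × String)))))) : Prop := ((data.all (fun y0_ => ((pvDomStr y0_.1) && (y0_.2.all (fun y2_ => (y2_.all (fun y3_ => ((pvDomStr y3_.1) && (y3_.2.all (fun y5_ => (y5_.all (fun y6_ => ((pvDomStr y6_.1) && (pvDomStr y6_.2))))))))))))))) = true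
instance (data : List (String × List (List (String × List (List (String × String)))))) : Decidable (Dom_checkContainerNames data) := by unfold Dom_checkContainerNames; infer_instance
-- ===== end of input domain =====

-- B replaces A's flag + per-VPC name-list build + len(set()) comparison with an early-return
-- scan keeping an incremental per-VPC 'seen' set (idiomatic; return value only, no mutation).

-- ===== PORT A =====
-- names.append(vms["name"]) over vpc["containers"], then len(names) != len(set(names));
-- flag + break becomes a Bool-returning recursion over the vpcs list with the names accumulator.
def pvALoop (vpcs : List (List (String × List (List (String × String))))) (names : List String) : Bool :=
  match vpcs with
  | [] => false
  | vpc :: rest =>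
    if (List.lookup "containers" vpc).isSome then
      let names2 := names ++ ((List.lookup "containers" vpc).getD []).map
        (fun vms => (List.lookup "name" vms).getD "")
      if names2.length ≠ (PySem.Set.ofList names2).length then true
      else pvALoop rest []
    else pvALoop rest names

def checkContainerNames (data : List (String × List (List (String × List (List (String × String)))))) : String :=
  if pvALoop ((List.lookup "vpcs" data).getD []) [] then "\t[E] Conflicting Container Names (0x1e)"
  else "[OK] Container Names valid (0x00)"

-- ===== PORT B =====
-- per-VPC incremental 'seen' set; 'return' inside the loops becomes a Bool-returning recursion.
def pvBScan (seen : PySem.Set String) (cs : List (List (String × String))) : Bool :=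
  match cs with
  | [] => false
  | vms :: rest =>
    let name := (List.lookup "name" vms).getD ""
    if PySem.Set.contains seen name then true
    else pvBScan (PySem.Set.add seen name) rest

def pvBLoop (vpcs : List (List (String × List (List (String × String))))) : Bool :=
  match vpcs with
  | [] => false
  | vpc :: rest =>
    match List.lookup "containers" vpc with
    | some cs => if pvBScan PySem.Set.empty cs then true else pvBLoop rest
    | none => pvBLoop rest

def checkContainerNames_alt (data : List (String × List (List (String × List (List (String × String)))))) : String :=
  if pvBLoop ((List.lookup "vpcs" data).getD []) then "\t[E] Conflicting Container Names (0x1e)"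
  else "[OK] Container Names valid (0x00)"

-- ===== PRECONDITION & SPEC =====
-- Pre_ excludes the inputs where Python A raises KeyError: data without a "vpcs" key, or a
-- container (inside a vpc that has a "containers" key) without a "name" key. It is slightly
-- conservative: it also excludes inputs where a duplicate in an earlier vpc makes A break
-- before reaching a later container that lacks "name"; there A and B both return the conflict
-- string (see claim.json cites).
def pvVpcOk (vpc : List (String × List (List (String × String)))) : Bool :=
  match List.lookup "containers" vpc with
  | some cs => cs.all (fun vms => (List.lookup "name" vms).isSome)
  | none => true

def Pre_checkContainerNames (data : List (String × List (List (String × List (List (String × String)))))) : Prop :=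
  (List.lookup "vpcs" data).isSome = true ∧
  ((List.lookup "vpcs" data).getD []).all pvVpcOk = true

instance (data : List (String × List (List (String × List (List (String × String)))))) : Decidable (Pre_checkContainerNames data) := by
  unfold Pre_checkContainerNames; infer_instance

def pvWitness_checkContainerNames : (List (String × List (List (String × List (List (String × String)))))) :=
  [("vpcs", [[("containers", [[("name", "a")], [("name", "b")]])], []])]

def Spec_checkContainerNames (data : List (String × List (List (String × List (List (String × String)))))) (out : String) : Prop := out = checkContainerNames_alt data
instance (data : List (String × List (List (String × List (List (String × String)))))) (out : String) : Decidable (Spec_checkContainerNames data out) := by unfold Spec_checkContainerNames; infer_instance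

-- ===== CLAIM (what is proved, stated in full; the proofs are below) =====
def Claim_equal_checkContainerNames : Prop := ∀ (data : List (String × List (List (String × List (List (String × String)))))), Dom_checkContainerNames data → Pre_checkContainerNames data → Spec_checkContainerNames data (checkContainerNames data)

-- ===== LEMMAS AND PROOFS =====

theorem pv_len_foldl_add_le (l s : List String) :
    (l.foldl PySem.Set.add s).length ≤ s.length + l.length := by
  induction l generalizing s with
  | nil => simp
  | cons x l ih =>
    simp only [List.foldl_cons, List.length_cons]
    have h := ih (PySem.Set.add s x)
    have : (PySem.Set.add s x).length ≤ s.length + 1 := by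
      unfold PySem.Set.add
      split <;> simp
    omega

theorem pv_len_foldl_add_iff (l : List String) : ∀ (s : List String), s.Nodup →
    ((l.foldl PySem.Set.add s).length = s.length + l.length ↔ (s ++ l).Nodup) := by
  induction l with
  | nil => intro s hs; simpa
  | cons x l ih =>
    intro s hs
    simp only [List.foldl_cons, List.length_cons]
    by_cases hx : PySem.Set.contains s x = true
    · have hmem : x ∈ s := (PySem.Set.contains_iff s x).mp hx
      have hadd : PySem.Set.add s x = s := by unfold PySem.Set.add; simp [hmem]
      rw [hadd]
      constructor
      · intro h
        have := pv_len_foldl_add_le l s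
        omega
      · intro h
        have exB := List.nodup_append.mp h
        exact ((exB.2.2 x hmem x (by simp)) rfl).elim
    · have hmem : x ∉ s := by intro h; exact hx ((PySem.Set.contains_iff s x).mpr h)
      have hadd : PySem.Set.add s x = s ++ [x] := by unfold PySem.Set.add; simp [hmem]
      rw [hadd]
      have hs' : (s ++ [x]).Nodup := by
        rw [List.nodup_append]
        refine ⟨hs, List.nodup_singleton _, ?_⟩
        intro a ha b hb hab
        simp only [List.mem_singleton] at hb
        exact hmem ((hab.trans hb) ▸ ha)
      have harith : s.length + (l.length + 1) = (s ++ [x]).length + l.length := by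
        simp only [List.length_append, List.length_cons, List.length_nil]
        omega
      rw [harith, ih (s ++ [x]) hs']
      constructor <;> (intro h; first | simpa [List.append_assoc] using h)

theorem pv_lenNe_iff (l : List String) :
    (l.length ≠ (PySem.Set.ofList l).length) ↔ ¬ l.Nodup := by
  have h := pv_len_foldl_add_iff l [] (by simp)
  simp only [List.nil_append, List.length_nil, Nat.zero_add] at h
  unfold PySem.Set.ofList PySem.Set.empty
  constructor
  · intro hne hn; exact hne (h.mpr hn).symm
  · intro hn hne; exact hn (h.mp hne.symm)

theorem pv_bScan_iff (cs : List (List (String × String))) : ∀ (seen : PySem.Set String), List.Nodup seen →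
    (pvBScan seen cs = true ↔
      ¬ (seen ++ cs.map (fun vms => (List.lookup "name" vms).getD "")).Nodup) := by
  induction cs with
  | nil => intro seen hs; simp [pvBScan, hs]
  | cons vms rest ih =>
    intro seen hs
    simp only [pvBScan, List.map_cons]
    by_cases hc : PySem.Set.contains seen ((List.lookup "name" vms).getD "") = true
    · have hmem := (PySem.Set.contains_iff _ _).mp hc
      simp only [hc, if_true, true_iff]
      intro h
      have := List.nodup_append.mp h
      exact (this.2.2 _ hmem _ (by simp)) rfl
    · have hmem : ((List.lookup "name" vms).getD "") ∉ seen := by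
        intro h; exact hc ((PySem.Set.contains_iff _ _).mpr h)
      have hcf : PySem.Set.contains seen ((List.lookup "name" vms).getD "") = false := by
        cases hq : PySem.Set.contains seen ((List.lookup "name" vms).getD "") with
        | false => rfl
        | true => exact absurd hq hc
      have hadd : PySem.Set.add seen ((List.lookup "name" vms).getD "") = seen ++ [((List.lookup "name" vms).getD "")] := by
        unfold PySem.Set.add; simp [hmem]
      have hs' : (seen ++ [((List.lookup "name" vms).getD "")]).Nodup := by
        rw [List.nodup_append]
        refine ⟨hs, List.nodup_singleton _, ?_⟩
        intro a ha b hb hab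
        simp only [List.mem_singleton] at hb
        exact hmem ((hab.trans hb) ▸ ha)
      simp only [hcf, Bool.false_eq_true, if_false, hadd]
      rw [ih _ hs']
      constructor
      · intro h; intro h2; exact h (by simpa [List.append_assoc] using h2)
      · intro h; intro h2; exact h (by simpa [List.append_assoc] using h2)

theorem pv_loop_eq (vpcs : List (List (String × List (List (String × String))))) :
    pvALoop vpcs [] = pvBLoop vpcs := by
  induction vpcs with
  | nil => rfl
  | cons vpc rest ih =>
    cases h : List.lookup "containers" vpc with
    | none =>
      simp only [pvALoop, pvBLoop, h, Option.isSome_none, Bool.false_eq_true, if_false]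
      exact ih
    | some cs =>
      have hcond : ((cs.map (fun vms => (List.lookup "name" vms).getD "")).length
          ≠ (PySem.Set.ofList (cs.map (fun vms => (List.lookup "name" vms).getD ""))).length)
          ↔ pvBScan PySem.Set.empty cs = true := by
        rw [pv_lenNe_iff]
        rw [pv_bScan_iff cs PySem.Set.empty (by simp [PySem.Set.empty])]
        simp [PySem.Set.empty]
      simp only [pvALoop, pvBLoop, h, Option.isSome_some, if_true, Option.getD_some,
        List.nil_append]
      by_cases hb : pvBScan PySem.Set.empty cs = true
      · rw [if_pos (hcond.mpr hb), if_pos hb]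
      · have hnb : ¬ ((cs.map (fun vms => (List.lookup "name" vms).getD "")).length
            ≠ (PySem.Set.ofList (cs.map (fun vms => (List.lookup "name" vms).getD ""))).length) :=
          fun hcc => hb (hcond.mp hcc)
        rw [if_neg hnb, if_neg hb]
        exact ih

-- ===== VERDICT (by name: the statement is the Claim_ definition above) =====
theorem checkContainerNames_spec : Claim_equal_checkContainerNames := by
  intro data _ _
  unfold Spec_checkContainerNames checkContainerNames checkContainerNames_alt
  rw [pv_loop_eq]
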